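-- pv_equiv track=rewrite | github.com/davidsykes/pipico | IR/plots/plot.py | convert
-- ===== SOURCE A (Python) =====
-- def convert(data):
--     data2 = []
--     ltime = 0
--     for d in data:
--         ctime = ltime + d[0]
--         d[0] = ctime
--         data2.append(d)
--         ltime = ctime
--     return data2
-- ===== SOURCE B (Python) =====
-- def convert(data):
--     # Two-phase: compute all prefix sums first, then build fresh rows (no mutation of data).
--     prefixes = []
--     total = 0
--     for d in data:
--         total += d[0]
--         prefixes.append(total)
--     return [[s] + d[1:] for d, s in zip(data, prefixes)]
-- ===== Notes on version B (the rewrite author's own statement) =====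
-- stated objective: simpler
-- what changed: Replaces the single mutate-and-append loop (which writes the running total back into each row in place) by a two-phase decomposition: materialize the list of prefix sums, then build fresh output rows with a zip comprehension; data is not mutated.
import Mathlib
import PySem

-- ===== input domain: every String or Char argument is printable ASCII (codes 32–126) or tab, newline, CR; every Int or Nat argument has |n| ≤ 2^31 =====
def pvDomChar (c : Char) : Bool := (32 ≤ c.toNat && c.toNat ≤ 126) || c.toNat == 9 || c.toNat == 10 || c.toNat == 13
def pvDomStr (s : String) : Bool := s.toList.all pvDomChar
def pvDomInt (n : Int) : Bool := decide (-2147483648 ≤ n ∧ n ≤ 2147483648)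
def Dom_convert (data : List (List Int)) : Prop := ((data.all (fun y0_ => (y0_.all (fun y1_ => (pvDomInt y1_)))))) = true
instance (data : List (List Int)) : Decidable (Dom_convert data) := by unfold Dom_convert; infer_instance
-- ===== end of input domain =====

-- B replaces A's mutate-and-append loop by prefix sums plus a zip comprehension building
-- fresh rows; return values agree, but A mutates its argument's rows in place and B does not
-- (the equivalence proved here is about the return value only).

-- ===== PORT A =====
-- for-loop over data with state (data2, ltime); d[0] read/write are exact for the
-- nonempty rows admitted by Pre_convert (pyGetD/pySetD = their pyGet?/pySet? under InRange)
def convertLoopA : List (List Int) → List (List Int) → Int → List (List Int)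
  | [], data2, _ => data2
  | d :: rest, data2, ltime =>
      let ctime := ltime + PySem.List.pyGetD d 0 0
      let d' := PySem.List.pySetD d 0 ctime
      convertLoopA rest (data2 ++ [d']) ctime

def convert (data : List (List Int)) : List (List Int) := convertLoopA data [] 0

-- ===== PORT B =====
-- phase 1 of Source B: the running-total loop producing the list of prefix sums
def prefixLoopB : List (List Int) → Int → List Int
  | [], _ => []
  | d :: rest, total =>
      let total' := total + PySem.List.pyGetD d 0 0
      total' :: prefixLoopB rest total'

-- phase 2: the zip comprehension [[s] + d[1:] for d, s in zip(data, prefixes)]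
def convert_alt (data : List (List Int)) : List (List Int) :=
  let prefixes := prefixLoopB data 0
  (data.zip prefixes).map (fun p => p.2 :: PySem.List.slice p.1 (some 1) none)

-- ===== PRECONDITION & SPEC =====
-- Pre_ excludes inputs containing an empty row, on which A's d[0] raises IndexError.
def Pre_convert (data : List (List Int)) : Prop := ∀ d ∈ data, d ≠ []
instance (data : List (List Int)) : Decidable (Pre_convert data) := by unfold Pre_convert; infer_instance

def pvWitness_convert : List (List Int) := [[3, 7], [2], [-1, 0, 5]]

def Spec_convert (data : List (List Int)) (out : List (List Int)) : Prop := out = convert_alt data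
instance (data : List (List Int)) (out : List (List Int)) : Decidable (Spec_convert data out) := by unfold Spec_convert; infer_instance

-- ===== CLAIM (what is proved, stated in full; the proofs are below) =====
def Claim_equal_convert : Prop := ∀ (data : List (List Int)), Dom_convert data → Pre_convert data → Spec_convert data (convert data)

-- ===== LEMMAS AND PROOFS =====
theorem convertLoopA_eq (data : List (List Int)) (h : ∀ d ∈ data, d ≠ []) :
    ∀ (acc : List (List Int)) (t : Int),
    convertLoopA data acc t
      = acc ++ (data.zip (prefixLoopB data t)).map (fun p => p.2 :: PySem.List.slice p.1 (some 1) none) := by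
  induction data with
  | nil => intro acc t; simp [convertLoopA]
  | cons d rest ih =>
      intro acc t
      obtain ⟨x, xs, rfl⟩ := List.exists_cons_of_ne_nil (h d (by simp))
      rw [convertLoopA, ih (fun d hd => h d (by simp [hd]))]
      simp [prefixLoopB, PySem.List.slice_from_one, PySem.List.pySetD, PySem.List.pySet?,
        PySem.List.pyIdx?, PySem.List.pyGetD, PySem.List.pyGet?]

theorem convert_spec : Claim_equal_convert := by
  intro data _ hpre
  unfold Spec_convert convert convert_alt
  simpa using convertLoopA_eq data hpre [] 0
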